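-- pv_equiv track=rewrite | github.com/Akash-Naickar/Delta-Headlines | t5transformer.py | find_longest_length
-- ===== SOURCE A (Python) =====
-- def find_longest_length(dataset):
--     """
--     Find the longest article and summary in the entire training set.
--     """
--     max_length = 0
--     counter_4k = 0
--     counter_2k = 0
--     counter_1k = 0
--     counter_500 = 0
--     for text in dataset:
--         corpus = [
--             word for word in text.split()
--         ]
--         if len(corpus) > 4000:
--             counter_4k += 1
--         if len(corpus) > 2000:
--             counter_2k += 1
--         if len(corpus) > 1000:
--             counter_1k += 1
--         if len(corpus) > 500:
--             counter_500 += 1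
--         if len(corpus) > max_length:
--             max_length = len(corpus)
--     return max_length, counter_4k, counter_2k, counter_1k, counter_500
-- ===== SOURCE B (Python) =====
-- def find_longest_length(dataset):
--     """
--     Find the longest article and summary in the entire training set.
--     """
--     lengths = sorted((len(text.split()) for text in dataset), reverse=True)
--     max_length = lengths[0] if lengths else 0
--
--     def count_above(threshold):
--         # lengths is sorted descending, so stop at the first value <= threshold
--         count = 0
--         for l in lengths:
--             if l <= threshold:
--                 break
--             count += 1
--         return count
--
--     return (max_length, count_above(4000), count_above(2000),
--             count_above(1000), count_above(500))
-- ===== Notes on version B (the rewrite author's own statement) =====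
-- stated objective: alternative
-- what changed: B sorts the word counts in descending order once; the maximum is the first element of the sorted table and each threshold counter is the length of the prefix of values above the threshold, found by an early-exiting walk whose correctness depends on sortedness, instead of A's single loop with five mutable counters.
import Mathlib
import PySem

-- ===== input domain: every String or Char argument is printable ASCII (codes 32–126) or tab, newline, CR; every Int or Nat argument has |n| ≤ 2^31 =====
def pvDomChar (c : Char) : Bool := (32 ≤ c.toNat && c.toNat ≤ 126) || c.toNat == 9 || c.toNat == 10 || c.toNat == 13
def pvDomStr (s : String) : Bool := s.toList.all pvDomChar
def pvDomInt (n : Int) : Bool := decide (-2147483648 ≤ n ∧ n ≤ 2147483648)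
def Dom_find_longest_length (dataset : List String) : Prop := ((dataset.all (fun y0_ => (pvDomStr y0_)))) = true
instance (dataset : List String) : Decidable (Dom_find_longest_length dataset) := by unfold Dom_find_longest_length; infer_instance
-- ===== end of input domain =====

-- B sorts the word counts in descending order once and reads each answer off the sorted table
-- (max = first element, counters = early-exiting prefix walks); objective: alternative algorithm.

-- ===== PORT A =====
-- one loop, five mutable counters updated in A's branch order
def find_longest_length (dataset : List String) : Int × Int × Int × Int × Int :=
  let st := dataset.foldl
    (fun (st : Int × Int × Int × Int × Int) text =>
      let corpus := PySem.Str.split₀ text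
      let n : Int := (corpus.length : Int)
      let c4 := if n > 4000 then st.2.1 + 1 else st.2.1
      let c2 := if n > 2000 then st.2.2.1 + 1 else st.2.2.1
      let c1 := if n > 1000 then st.2.2.2.1 + 1 else st.2.2.2.1
      let c5 := if n > 500 then st.2.2.2.2 + 1 else st.2.2.2.2
      let m := if n > st.1 then n else st.1
      (m, c4, c2, c1, c5))
    (0, 0, 0, 0, 0)
  st

-- ===== PORT B =====
-- the early-exiting for-loop of Source B's count_above: stop at the first value <= threshold
def pvCountAbove (threshold : Int) : List Int → Int
  | [] => 0
  | l :: rest => if l ≤ threshold then 0 else pvCountAbove threshold rest + 1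

def find_longest_length_alt (dataset : List String) : Int × Int × Int × Int × Int :=
  let lengths : List Int :=
    PySem.List.sorted (dataset.map (fun text => ((PySem.Str.split₀ text).length : Int)))
      (fun x => x) true
  let max_length : Int := match lengths with | [] => 0 | m :: _ => m
  (max_length, pvCountAbove 4000 lengths, pvCountAbove 2000 lengths,
   pvCountAbove 1000 lengths, pvCountAbove 500 lengths)

-- ===== PRECONDITION & SPEC =====
def Spec_find_longest_length (dataset : List String) (out : Int × Int × Int × Int × Int) : Prop := out = find_longest_length_alt dataset
instance (dataset : List String) (out : Int × Int × Int × Int × Int) : Decidable (Spec_find_longest_length dataset out) := by unfold Spec_find_longest_length; infer_instance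

-- ===== CLAIM (what is proved, stated in full; the proofs are below) =====
def Claim_equal_find_longest_length : Prop := ∀ (dataset : List String), Dom_find_longest_length dataset → Spec_find_longest_length dataset (find_longest_length dataset)

-- ===== LEMMAS AND PROOFS =====

-- A's fold, characterised via max-fold and countP over the word-count table
theorem pv_foldA (ds : List String) (m c4 c2 c1 c5 : Int) :
    ds.foldl
      (fun (st : Int × Int × Int × Int × Int) text =>
        let corpus := PySem.Str.split₀ text
        let n : Int := (corpus.length : Int)
        let c4 := if n > 4000 then st.2.1 + 1 else st.2.1
        let c2 := if n > 2000 then st.2.2.1 + 1 else st.2.2.1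
        let c1 := if n > 1000 then st.2.2.2.1 + 1 else st.2.2.2.1
        let c5 := if n > 500 then st.2.2.2.2 + 1 else st.2.2.2.2
        let mx := if n > st.1 then n else st.1
        (mx, c4, c2, c1, c5))
      (m, c4, c2, c1, c5) =
    ((ds.map (fun t => ((PySem.Str.split₀ t).length : Int))).foldl max m,
     c4 + ((ds.map (fun t => ((PySem.Str.split₀ t).length : Int))).countP (fun l => decide (l > 4000)) : Int),
     c2 + ((ds.map (fun t => ((PySem.Str.split₀ t).length : Int))).countP (fun l => decide (l > 2000)) : Int),
     c1 + ((ds.map (fun t => ((PySem.Str.split₀ t).length : Int))).countP (fun l => decide (l > 1000)) : Int),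
     c5 + ((ds.map (fun t => ((PySem.Str.split₀ t).length : Int))).countP (fun l => decide (l > 500)) : Int)) := by
  induction ds generalizing m c4 c2 c1 c5 with
  | nil => simp
  | cons h t ih =>
      simp only [List.foldl_cons, List.map_cons, List.countP_cons, decide_eq_true_eq, ih,
        Prod.mk.injEq]
      refine ⟨?_, ?_, ?_, ?_, ?_⟩
      · congr 1
        rw [max_def]
        split_ifs <;> omega
      all_goals split_ifs <;> push_cast <;> omega

-- on a non-increasing list, the early-exit walk counts exactly the elements above the threshold
theorem pv_countAbove_eq_countP (th : Int) (L : List Int)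
    (h : L.Pairwise (fun a b => b ≤ a)) :
    pvCountAbove th L = (L.countP (fun l => decide (l > th)) : Int) := by
  induction L with
  | nil => simp [pvCountAbove]
  | cons x t ih =>
      rcases List.pairwise_cons.mp h with ⟨hx, ht⟩
      by_cases hle : x ≤ th
      · have hz : t.countP (fun l => decide (l > th)) = 0 := by
          rw [List.countP_eq_zero]
          intro y hy
          simp only [decide_eq_true_eq]
          have := hx y hy
          omega
        simp [pvCountAbove, hle, hz]
      · simp only [pvCountAbove, if_neg hle, ih ht, List.countP_cons,
          decide_eq_true_eq, if_pos (by omega : x > th)]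
        push_cast
        ring

theorem pv_foldl_max_le (L : List Int) (a m : Int) (ha : a ≤ m)
    (hL : ∀ x ∈ L, x ≤ m) : L.foldl max a ≤ m := by
  induction L generalizing a with
  | nil => simpa using ha
  | cons h t ih =>
      exact ih (max a h) (max_le ha (hL h (List.mem_cons_self ..)))
        (fun x hx => hL x (List.mem_cons_of_mem _ hx))

theorem pv_le_foldl_max (L : List Int) (a : Int) : a ≤ L.foldl max a := by
  induction L generalizing a with
  | nil => simp
  | cons h t ih => exact le_trans (le_max_left a h) (ih (max a h))

theorem pv_mem_le_foldl_max (L : List Int) (a x : Int) (hx : x ∈ L) :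
    x ≤ L.foldl max a := by
  induction L generalizing a with
  | nil => cases hx
  | cons h t ih =>
      rcases List.mem_cons.mp hx with rfl | hx
      · exact le_trans (le_max_right a x) (pv_le_foldl_max t (max a x))
      · exact ih _ hx

theorem find_longest_length_eq (dataset : List String) :
    find_longest_length dataset = find_longest_length_alt dataset := by
  unfold find_longest_length find_longest_length_alt
  simp only [pv_foldA, zero_add]
  have hnn : ∀ x ∈ dataset.map (fun t => ((PySem.Str.split₀ t).length : Int)), 0 ≤ x := by
    intro x hx
    rcases List.mem_map.mp hx with ⟨t', _, ht'⟩
    omega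
  generalize hLdef : dataset.map (fun t => ((PySem.Str.split₀ t).length : Int)) = L at hnn ⊢
  have hperm : (PySem.List.sorted L (fun x => x) true).Perm L := PySem.List.sorted_perm ..
  have hpw : (PySem.List.sorted L (fun x => x) true).Pairwise (fun a b => b ≤ a) := by
    have := PySem.List.sorted_pairwise_rev (xs := L) (key := fun x => x)
    simpa using this
  cases hS : PySem.List.sorted L (fun x => x) true with
  | nil =>
      rw [hS] at hperm
      have hLnil : L = [] := hperm.symm.eq_nil
      simp [hLnil, pvCountAbove]
  | cons m t =>
      rw [hS] at hperm hpw
      have hmem : m ∈ L := hperm.mem_iff.mp (List.mem_cons_self ..)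
      have hge : ∀ y ∈ L, y ≤ m := by
        intro y hy
        have := PySem.List.key_head_sorted_rev_ge (xs := L) (key := fun x => x) hS y hy
        simpa using this
      have hm0 : 0 ≤ m := hnn m hmem
      have hmaxv : L.foldl max 0 = m :=
        le_antisymm (pv_foldl_max_le L 0 m hm0 hge) (pv_mem_le_foldl_max L 0 m hmem)
      have hcnt : ∀ th : Int, pvCountAbove th (m :: t) = (L.countP (fun l => decide (l > th)) : Int) := by
        intro th
        rw [pv_countAbove_eq_countP th _ hpw, hperm.countP_eq]
      simp [hmaxv, hcnt]

-- ===== VERDICT (by name: the statement is the Claim_ definition above) =====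
theorem find_longest_length_spec : Claim_equal_find_longest_length := by
  intro dataset _
  unfold Spec_find_longest_length
  exact find_longest_length_eq dataset
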